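-- pv_equiv track=rewrite | github.com/alexandrezamberlan/python-cienciadados | 5_programas_em_aula/curiosidades_lista_em_listas.py | numeros_que_aparecem_em_apenas_uma
-- ===== SOURCE A (Python) =====
-- def numeros_que_aparecem_em_apenas_uma(lista_generica):
--     numeros_repetidos = set()
--     numeros_unicos = set()
--     for lista in lista_generica:
--         for numero in lista:
--             if numero in numeros_repetidos:
--                 numeros_unicos.discard(numero)
--             else:
--                 if numero in numeros_unicos:
--                     numeros_unicos.remove(numero)
--                 else:
--                     numeros_unicos.add(numero)
--                     numeros_repetidos.add(numero)
--     return numeros_unicos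
-- ===== SOURCE B (Python) =====
-- def numeros_que_aparecem_em_apenas_uma(lista_generica):
--     contagem = {}
--     for lista in lista_generica:
--         for numero in lista:
--             contagem[numero] = contagem.get(numero, 0) + 1
--     return {numero for numero, vezes in contagem.items() if vezes == 1}
-- ===== Notes on version B (the rewrite author's own statement) =====
-- stated objective: simpler
-- what changed: Replaces A's incremental two-set add/discard maintenance with a single tally dict built in one pass, followed by a set comprehension keeping the numbers whose total count is 1.
import Mathlib
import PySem

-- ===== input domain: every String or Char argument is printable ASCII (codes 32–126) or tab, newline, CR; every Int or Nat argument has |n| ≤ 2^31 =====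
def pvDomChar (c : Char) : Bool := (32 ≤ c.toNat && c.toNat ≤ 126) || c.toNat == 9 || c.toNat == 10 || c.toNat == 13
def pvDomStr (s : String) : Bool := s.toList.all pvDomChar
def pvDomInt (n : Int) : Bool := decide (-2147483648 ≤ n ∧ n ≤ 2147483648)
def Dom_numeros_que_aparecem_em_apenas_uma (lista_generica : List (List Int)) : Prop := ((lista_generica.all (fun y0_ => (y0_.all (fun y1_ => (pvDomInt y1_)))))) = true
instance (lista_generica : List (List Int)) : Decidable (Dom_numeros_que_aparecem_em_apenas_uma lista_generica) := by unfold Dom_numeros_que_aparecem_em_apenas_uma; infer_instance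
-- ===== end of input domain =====

-- B replaces A's incremental two-set (seen / unique-so-far) maintenance with a tally dict
-- built in one pass plus a count == 1 filter; objective: simpler.


-- ===== PORT A =====
-- one element step of A's inner loop body (branches in A's order; the guarded
-- `remove` is ported as `discard`: under the `numero in numeros_unicos` guard
-- Python's remove cannot raise and removes the element, exactly `discard`)
def pvStepA (st : PySem.Set Int × PySem.Set Int) (numero : Int) : PySem.Set Int × PySem.Set Int :=
  if PySem.Set.contains st.1 numero then
    (st.1, PySem.Set.discard st.2 numero)
  else
    if PySem.Set.contains st.2 numero then
      (st.1, PySem.Set.discard st.2 numero)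
    else
      (PySem.Set.add st.1 numero, PySem.Set.add st.2 numero)

def numeros_que_aparecem_em_apenas_uma (lista_generica : List (List Int)) : List Int :=
  (lista_generica.foldl
    (fun st lista => lista.foldl pvStepA st)
    (PySem.Set.empty, PySem.Set.empty)).2

-- ===== PORT B =====
-- tally dict (contagem[numero] = contagem.get(numero, 0) + 1), then the set
-- comprehension over its items keeping the numbers whose count is 1
def numeros_que_aparecem_em_apenas_uma_alt (lista_generica : List (List Int)) : List Int :=
  PySem.Set.ofList
    ((((lista_generica.foldl
        (fun d lista => lista.foldl (fun d numero => d.insert numero (d.getD numero 0 + 1)) d)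
        (PySem.Dict.empty : PySem.Dict Int Int))).items.filter (fun p => p.2 == 1)).map (·.1))

-- ===== PRECONDITION & SPEC =====
def Spec_numeros_que_aparecem_em_apenas_uma (lista_generica : List (List Int)) (out : List Int) : Prop := out = numeros_que_aparecem_em_apenas_uma_alt lista_generica
instance (lista_generica : List (List Int)) (out : List Int) : Decidable (Spec_numeros_que_aparecem_em_apenas_uma lista_generica out) := by unfold Spec_numeros_que_aparecem_em_apenas_uma; infer_instance

-- ===== CLAIM (what is proved, stated in full; the proofs are below) =====
def Claim_equal_numeros_que_aparecem_em_apenas_uma : Prop := ∀ (lista_generica : List (List Int)), Dom_numeros_que_aparecem_em_apenas_uma lista_generica → Spec_numeros_que_aparecem_em_apenas_uma lista_generica (numeros_que_aparecem_em_apenas_uma lista_generica)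

-- ===== LEMMAS AND PROOFS =====

-- canonical state of A's loop after processing the flattened prefix p:
-- repetidos = the distinct elements of p in first-occurrence order,
-- unicos    = those among them occurring exactly once in p
def pvState (p : List Int) : PySem.Set Int × PySem.Set Int :=
  (PySem.Set.ofList p, (PySem.Set.ofList p).filter (fun k => p.count k == 1))

lemma pvStepA_state (p : List Int) (n : Int) : pvStepA (pvState p) n = pvState (p ++ [n]) := by
  unfold pvStepA pvState
  by_cases h : n ∈ p
  · have hc : PySem.Set.contains (PySem.Set.ofList p) n = true := by
      simp [PySem.Set.mem_ofList, h]
    rw [if_pos hc, PySem.Set.ofList_append_singleton,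
        PySem.Set.add_of_mem (by simpa [PySem.Set.mem_ofList] using h)]
    refine Prod.ext rfl ?_
    simp only [PySem.Set.discard, List.filter_filter]
    refine List.filter_congr ?_
    intro k hk
    by_cases hkn : k = n
    · subst hkn
      have : 1 ≤ p.count k := List.count_pos_iff.mpr h
      simp [List.count_append]
      omega
    · simp [List.count_append, Ne.symm hkn]
      exact fun _ => hkn
  · have hc : PySem.Set.contains (PySem.Set.ofList p) n = false := by
      simp [PySem.Set.mem_ofList, h]
    have hc2 : PySem.Set.contains ((PySem.Set.ofList p).filter (fun k => p.count k == 1)) n = false := by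
      simp [List.mem_filter, PySem.Set.mem_ofList, h]
    rw [if_neg (by simp [h]), if_neg (by simp [List.mem_filter, PySem.Set.mem_ofList]; intro hn; exact absurd hn h)]
    rw [PySem.Set.ofList_append_singleton,
        PySem.Set.add_of_not_mem (by simpa [PySem.Set.mem_ofList] using h)]
    refine Prod.ext rfl ?_
    rw [PySem.Set.add_of_not_mem (by simp [List.mem_filter, PySem.Set.mem_ofList, h])]
    rw [List.filter_append]
    have h0 : p.count n = 0 := List.count_eq_zero.mpr h
    refine congrArg₂ (· ++ ·) ?_ ?_
    · refine List.filter_congr ?_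
      intro k hk
      have hkn : k ≠ n := fun e => h (e ▸ ((PySem.Set.mem_ofList _ _).mp hk))
      simp [List.count_append, Ne.symm hkn]
    · simp [List.count_append, h0]

lemma pvFoldA (l p : List Int) : l.foldl pvStepA (pvState p) = pvState (p ++ l) := by
  induction l generalizing p with
  | nil => simp
  | cons n t ih =>
      rw [List.foldl_cons, pvStepA_state, ih, List.append_assoc, List.singleton_append]

-- ===== VERDICT (by name: the statement is the Claim_ definition above) =====
theorem numeros_que_aparecem_em_apenas_uma_spec : Claim_equal_numeros_que_aparecem_em_apenas_uma := by
  intro L _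
  unfold Spec_numeros_que_aparecem_em_apenas_uma
  unfold numeros_que_aparecem_em_apenas_uma numeros_que_aparecem_em_apenas_uma_alt
  rw [← List.foldl_flatten, ← List.foldl_flatten]
  have hA : (PySem.Set.empty, PySem.Set.empty) = pvState ([] : List Int) := rfl
  rw [hA, pvFoldA, List.nil_append]
  conv_rhs => rw [PySem.Dict.foldl_insert_getD_add_one_eq_counter]
  rw [PySem.Dict.items_counter]
  rw [List.filter_map, List.map_map]
  have hmap : ((fun p : Int × Int => p.1) ∘ fun k : Int => (k, (L.flatten.count k : Int))) = id := rfl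
  rw [hmap, List.map_id]
  have hpred : ∀ k ∈ PySem.Set.ofList L.flatten,
      (((fun p : Int × Int => p.2 == 1) ∘ fun k : Int => (k, (L.flatten.count k : Int))) k) = (L.flatten.count k == 1) := by
    intro k _
    simp [Nat.cast_eq_one]
  rw [List.filter_congr hpred]
  exact (PySem.Set.ofList_eq_self_of_nodup _ (List.Nodup.filter _ (PySem.Set.nodup_ofList _))).symm
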